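-- pv_equiv track=rewrite | github.com/sheat-git/mk8dx-bot | calculation.py | fillRank
-- ===== SOURCE A (Python) =====
-- def fillRank(rank,form=0,never = {1,2,3,4,5,6,7,8,9,10,11,12}):
--     if not form:
--         return
--     if len(rank) >= form:
--         return rank[:form]
--     never = set(never)
--     never -= set(rank)
--     if len(never) + len(rank) < form:
--         return
--     while len(rank) < form:
--         add = max(never)
--         rank.append(add)
--         never -= {add}
--     return sorted(rank)
-- ===== SOURCE B (Python) =====
-- def fillRank(rank, form=0, never={1, 2, 3, 4, 5, 6, 7, 8, 9, 10, 11, 12}):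
--     if not form:
--         return
--     if len(rank) >= form:
--         return rank[:form]
--     missing = sorted(set(never) - set(rank), reverse=True)
--     if len(missing) + len(rank) < form:
--         return
--     rank.extend(missing[:form - len(rank)])
--     return sorted(rank)
-- ===== Notes on version B (the rewrite author's own statement) =====
-- stated objective: simpler
-- what changed: The repeated max-and-remove selection loop is replaced by computing the missing values once with sorted(set(never)-set(rank), reverse=True) and extending rank with a prefix slice of that list.
import Mathlib
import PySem

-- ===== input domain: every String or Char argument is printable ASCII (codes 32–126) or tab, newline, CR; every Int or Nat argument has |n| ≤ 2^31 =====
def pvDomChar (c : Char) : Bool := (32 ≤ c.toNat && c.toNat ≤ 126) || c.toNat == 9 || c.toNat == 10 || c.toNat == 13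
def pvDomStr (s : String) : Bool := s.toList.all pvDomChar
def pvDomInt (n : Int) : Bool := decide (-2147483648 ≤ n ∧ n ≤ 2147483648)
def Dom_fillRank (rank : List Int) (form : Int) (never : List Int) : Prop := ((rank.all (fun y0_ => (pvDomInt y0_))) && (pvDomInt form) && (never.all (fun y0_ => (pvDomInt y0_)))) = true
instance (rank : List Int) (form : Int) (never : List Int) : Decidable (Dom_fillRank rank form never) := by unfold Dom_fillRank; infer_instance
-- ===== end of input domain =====

-- B replaces A's repeated max-and-remove loop by sorting the missing values once (descending)
-- and appending a prefix: simpler, same return value, and the same in-place appends to `rank`.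

-- ===== PORT A =====
-- A's while loop: `while len(rank) < form: add = max(never); rank.append(add); never -= {add}`.
-- Each iteration grows `rank` by one, so the loop runs exactly (form - len(rank)).toNat times:
-- that count is the structural fuel here. The `none` branch of max? (Python's ValueError on an
-- empty set) is unreachable under A's feasibility guard, which guarantees `never` stays nonempty.
def fillRankLoop (rank : List Int) (never : List Int) (fuel : Nat) : List Int :=
  match fuel with
  | 0 => rank
  | fuel + 1 =>
    match PySem.List.max? never (fun x => x) with
    | none => rank
    | some add => fillRankLoop (rank ++ [add]) (PySem.Set.diff never [add]) fuel

def fillRank (rank : List Int) (form : Int) (never : List Int) : Option (List Int) :=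
  if form == 0 then none
  else if (rank.length : Int) ≥ form then some (PySem.List.slice rank none (some form))
  else
    let nv := PySem.Set.diff (PySem.Set.ofList never) (PySem.Set.ofList rank)
    if (nv.length : Int) + (rank.length : Int) < form then none
    else some (PySem.List.sorted (fillRankLoop rank nv (form - (rank.length : Int)).toNat) (fun x => x) false)

-- ===== PORT B =====
def fillRank_alt (rank : List Int) (form : Int) (never : List Int) : Option (List Int) :=
  if form == 0 then none
  else if (rank.length : Int) ≥ form then some (PySem.List.slice rank none (some form))
  else
    let missing := PySem.List.sorted (PySem.Set.diff (PySem.Set.ofList never) (PySem.Set.ofList rank)) (fun x => x) true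
    if (missing.length : Int) + (rank.length : Int) < form then none
    else some (PySem.List.sorted (rank ++ PySem.List.slice missing none (some (form - (rank.length : Int)))) (fun x => x) false)

-- ===== PRECONDITION & SPEC =====
def Spec_fillRank (rank : List Int) (form : Int) (never : List Int) (out : Option (List Int)) : Prop := out = fillRank_alt rank form never
instance (rank : List Int) (form : Int) (never : List Int) (out : Option (List Int)) : Decidable (Spec_fillRank rank form never out) := by unfold Spec_fillRank; infer_instance

-- ===== CLAIM (what is proved, stated in full; the proofs are below) =====
def Claim_equal_fillRank : Prop := ∀ (rank : List Int) (form : Int) (never : List Int), Dom_fillRank rank form never → Spec_fillRank rank form never (fillRank rank form never)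

-- ===== LEMMAS AND PROOFS =====

-- A's repeated max-and-remove over a duplicate-free pool produces exactly the first k elements
-- of the pool sorted in descending order, appended to rank in that order.
lemma fillRankLoop_eq (k : Nat) : ∀ (rank nv : List Int), nv.Nodup → k ≤ nv.length →
    fillRankLoop rank nv k = rank ++ (PySem.List.sorted nv (fun x => x) true).take k := by
  induction k with
  | zero => intro rank nv _ _; simp [fillRankLoop]
  | succ k ih =>
    intro rank nv hnd hk
    have hne : nv ≠ [] := List.ne_nil_of_length_pos (by omega)
    obtain ⟨m', hm'⟩ : ∃ m, PySem.List.max? nv (fun x : Int => x) = some m := by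
      cases h : PySem.List.max? nv (fun x : Int => x) with
      | none => exact absurd ((PySem.List.max?_eq_none_iff nv _).mp h) hne
      | some m => exact ⟨m, rfl⟩
    have hslen : (PySem.List.sorted nv (fun x : Int => x) true).length = nv.length :=
      PySem.List.length_sorted nv _ true
    obtain ⟨m, t, hs⟩ : ∃ m t, PySem.List.sorted nv (fun x : Int => x) true = m :: t := by
      cases h : PySem.List.sorted nv (fun x : Int => x) true with
      | nil => rw [h] at hslen; simp at hslen; omega
      | cons m t => exact ⟨m, t, rfl⟩
    have hperm : (PySem.List.sorted nv (fun x : Int => x) true).Perm nv :=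
      PySem.List.sorted_perm nv _ true
    have hpermmt : (m :: t).Perm nv := hs ▸ hperm
    -- the first max? result is the head of the descending sort
    have hm'eq : m' = m := by
      have hmem : m ∈ nv := hpermmt.mem_iff.mp (List.mem_cons_self ..)
      have h1 : m ≤ m' := PySem.List.max?_isMax hm' m hmem
      have h2 : m' ≤ m :=
        PySem.List.key_head_sorted_rev_ge nv _ hs m' (PySem.List.max?_mem hm')
      omega
    subst hm'eq
    have hndmt : (m' :: t).Nodup := hpermmt.nodup_iff.mpr hnd
    have hmnott : m' ∉ t := (List.nodup_cons.mp hndmt).1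
    have hndt : t.Nodup := (List.nodup_cons.mp hndmt).2
    -- removing the max and sorting again is the tail of the descending sort
    have hdiffperm : t.Perm (PySem.Set.diff nv [m']) := by
      have : PySem.Set.diff nv [m'] = nv.filter (fun x => !([m'].contains x)) := rfl
      rw [this]
      refine List.Perm.trans ?_ (List.Perm.filter _ hpermmt)
      have hfil : (m' :: t).filter (fun x => !([m'].contains x)) = t := by
        simp only [List.filter_cons, List.contains_cons, List.contains_nil, BEq.rfl,
          Bool.true_or, Bool.not_true, Bool.false_eq_true, if_false]
        refine List.filter_eq_self.mpr fun a ha => ?_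
        have hne' : a ≠ m' := fun h => hmnott (h ▸ ha)
        simp [hne']
      rw [hfil]
    have hpairt : List.Pairwise (fun a b : Int => b < a) t := by
      have hge := PySem.List.sorted_pairwise_rev nv (fun x : Int => x)
      rw [hs] at hge
      have hnds : (m' :: t).Nodup := hndmt
      have := List.Pairwise.and (List.pairwise_cons.mp hge).2 (List.pairwise_cons.mp hnds).2
      exact this.imp (fun h => lt_of_le_of_ne h.1 (Ne.symm h.2))
    have hsortdiff : PySem.List.sorted (PySem.Set.diff nv [m']) (fun x : Int => x) true = t :=
      PySem.List.sorted_rev_eq_of_perm_of_pairwise_gt _ t _ hdiffperm hpairt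
    have hndd : (PySem.Set.diff nv [m']).Nodup := hdiffperm.nodup_iff.mp hndt
    have hkd : k ≤ (PySem.Set.diff nv [m']).length := by
      have h1 : (PySem.Set.diff nv [m']).length = t.length := hdiffperm.length_eq.symm
      have h2 : (m' :: t).length = nv.length := hpermmt.length_eq
      simp at h2; omega
    have := ih (rank ++ [m']) (PySem.Set.diff nv [m']) hndd hkd
    rw [hsortdiff] at this
    simp only [fillRankLoop, hm', this, hs]
    simp

-- the loop-fuel / prefix-length bound from the guards
theorem fillRank_spec_core (rank : List Int) (form : Int) (never : List Int) :
    fillRank rank form never = fillRank_alt rank form never := by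
  unfold fillRank fillRank_alt
  by_cases h0 : form == 0
  · simp [h0]
  · simp only [h0]
    by_cases h1 : (rank.length : Int) ≥ form
    · simp [h1]
    · simp only [h1, if_false]
      set nv := PySem.Set.diff (PySem.Set.ofList never) (PySem.Set.ofList rank) with hnv
      have hmlen : (PySem.List.sorted nv (fun x : Int => x) true).length = nv.length :=
        PySem.List.length_sorted nv _ true
      simp only [hmlen]
      by_cases h2 : (nv.length : Int) + (rank.length : Int) < form
      · simp [h2]
      · simp only [h2, if_false]
        have hnd : nv.Nodup := by
          rw [hnv]
          exact (PySem.Set.nodup_ofList never).filter _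
        have hpos : 0 ≤ form - (rank.length : Int) := by omega
        have hkle : (form - (rank.length : Int)).toNat ≤ nv.length := by omega
        rw [fillRankLoop_eq _ rank nv hnd hkle,
          PySem.List.slice_to (PySem.List.sorted nv (fun x : Int => x) true) hpos]

-- ===== VERDICT (by name: the statement is the Claim_ definition above) =====
theorem fillRank_spec : Claim_equal_fillRank := by
  intro rank form never _
  exact fillRank_spec_core rank form never
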